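-- pv_equiv track=rewrite | github.com/KLEWSKIY/- | 20.27.klivak.py | check_guaranteed_win
-- ===== SOURCE A (Python) =====
-- def check_guaranteed_win(hand):
--     if max(hand) >= 14:
--         return True
--     if len([card for card in hand if card >= 11]) >= 4:
--         return True
--     if len([card for card in hand if card >= 10]) >= 5:
--         return True
--     if len(set(hand)) >= 8:
--         return True
--     return False
-- ===== SOURCE B (Python) =====
-- def check_guaranteed_win(hand):
--     # Sort once (descending) and read order statistics instead of counting scans:
--     # count(hand, >= t) >= k  iff  the k-th largest card s[k-1] >= t.
--     s = sorted(hand, reverse=True)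
--     if s[0] >= 14:                      # raises IndexError on an empty hand
--         return True
--     if len(s) >= 4 and s[3] >= 11:
--         return True
--     if len(s) >= 5 and s[4] >= 10:
--         return True
--     distinct = 1 + sum(1 for a, b in zip(s, s[1:]) if a != b)
--     return distinct >= 8
-- ===== Notes on version B (the rewrite author's own statement) =====
-- stated objective: alternative
-- what changed: Replaces A's four counting scans (max, two filter-length comprehensions, set cardinality) by sorting the hand descending once and reading order statistics (s[0]>=14, s[3]>=11, s[4]>=10) plus one adjacent-pair scan of the sorted list for the distinct count; Pre_ excludes only the empty hand, on which A's max(hand) raises ValueError (B's s[0] raises there too).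
import Mathlib
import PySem

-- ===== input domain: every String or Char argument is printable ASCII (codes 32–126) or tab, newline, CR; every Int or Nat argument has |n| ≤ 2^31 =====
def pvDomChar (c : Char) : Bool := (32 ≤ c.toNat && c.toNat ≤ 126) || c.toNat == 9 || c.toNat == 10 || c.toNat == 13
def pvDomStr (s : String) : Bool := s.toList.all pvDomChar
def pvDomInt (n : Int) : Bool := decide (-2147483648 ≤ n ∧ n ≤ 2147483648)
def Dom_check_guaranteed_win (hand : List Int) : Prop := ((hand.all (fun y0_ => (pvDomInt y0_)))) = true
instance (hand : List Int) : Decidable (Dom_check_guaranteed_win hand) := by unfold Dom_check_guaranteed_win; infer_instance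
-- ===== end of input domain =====

-- B sorts the hand descending once and reads order statistics (plus one adjacent-pair scan for distinct values) instead of A's four counting scans; same thresholds, same result.


-- ===== PORT A =====
def check_guaranteed_win (hand : List Int) : Bool :=
  match PySem.List.max? hand (fun x => x) with
  | none => false   -- max([]) raises ValueError in Python; excluded by Pre_
  | some m =>
    if 14 ≤ m then true
    else if 4 ≤ (hand.filter (fun card => decide (11 ≤ card))).length then true
    else if 5 ≤ (hand.filter (fun card => decide (10 ≤ card))).length then true
    else if 8 ≤ PySem.Set.len (PySem.Set.ofList hand) then true
    else false

-- ===== PORT B =====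
-- body of B after 's = sorted(hand, reverse=True)'
def cgwBody (s : List Int) : Bool :=
  match PySem.List.pyGet? s 0 with
  | none => false   -- s[0] raises IndexError on an empty hand; excluded by Pre_
  | some h0 =>
    if 14 ≤ h0 then true
    else if decide (4 ≤ s.length) && decide (11 ≤ PySem.List.pyGetD s 3 0) then true
    else if decide (5 ≤ s.length) && decide (10 ≤ PySem.List.pyGetD s 4 0) then true
    else decide (8 ≤ 1 + (s.zip s.tail).countP (fun p => decide (p.1 ≠ p.2)))

def check_guaranteed_win_alt (hand : List Int) : Bool :=
  cgwBody (PySem.List.sorted hand (fun x => x) true)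

-- ===== PRECONDITION & SPEC =====
-- Pre_ excludes only the empty hand, on which A's max(hand) raises ValueError (B's s[0] raises IndexError there).
def Pre_check_guaranteed_win (hand : List Int) : Prop := hand ≠ []
instance (hand : List Int) : Decidable (Pre_check_guaranteed_win hand) := by unfold Pre_check_guaranteed_win; infer_instance
def pvWitness_check_guaranteed_win : List Int := [14, 2, 3]

def Spec_check_guaranteed_win (hand : List Int) (out : Bool) : Prop := out = check_guaranteed_win_alt hand
instance (hand : List Int) (out : Bool) : Decidable (Spec_check_guaranteed_win hand out) := by unfold Spec_check_guaranteed_win; infer_instance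

-- ===== CLAIM (what is proved, stated in full; the proofs are below) =====
def Claim_equal_check_guaranteed_win : Prop := ∀ (hand : List Int), Dom_check_guaranteed_win hand → Pre_check_guaranteed_win hand → Spec_check_guaranteed_win hand (check_guaranteed_win hand)

-- ===== LEMMAS AND PROOFS =====

-- Order statistic vs count: in a descending list, at least k+1 elements are ≥ t iff the (k+1)-th element exists and is ≥ t.
lemma countP_desc_iff (s : List Int) (t : Int) (k : Nat)
    (hd : s.Pairwise (fun a b => b ≤ a)) :
    (k + 1 ≤ s.countP (fun x => decide (t ≤ x))) ↔ ∃ h : k < s.length, t ≤ s[k] := by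
  induction s generalizing k with
  | nil => simp
  | cons x rest ih =>
    have hx : ∀ y ∈ rest, y ≤ x := (List.pairwise_cons.1 hd).1
    have hrest := (List.pairwise_cons.1 hd).2
    by_cases hxt : t ≤ x
    · cases k with
      | zero => simp [hxt]
      | succ k =>
        rw [List.countP_cons]
        simp only [hxt, decide_true, if_pos]
        constructor
        · intro h
          have : k + 1 ≤ rest.countP (fun x => decide (t ≤ x)) := by omega
          obtain ⟨hk, hv⟩ := (ih k hrest).1 this
          exact ⟨by simpa using Nat.succ_lt_succ hk, by simpa using hv⟩
        · intro ⟨hk, hv⟩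
          have hk' : k < rest.length := by simpa using Nat.lt_of_succ_lt_succ hk
          have := (ih k hrest).2 ⟨hk', by simpa using hv⟩
          omega
    · have hzero : (x :: rest).countP (fun x => decide (t ≤ x)) = 0 := by
        rw [List.countP_eq_zero]
        intro a ha
        rcases List.mem_cons.1 ha with rfl | ha'
        · simpa using hxt
        · have := hx a ha'
          simp only [decide_eq_true_eq]
          omega
      rw [hzero]
      constructor
      · omega
      · intro ⟨hk, hv⟩
        exfalso
        have hmem : (x :: rest)[k] ∈ x :: rest := List.getElem_mem hk
        rcases List.mem_cons.1 hmem with he | hm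
        · rw [he] at hv; exact hxt hv
        · have := hx _ hm; omega

-- Adjacent-pair scan vs cardinality: in a descending nonempty list, 1 + #adjacent unequal pairs = #distinct values.
lemma distinct_desc (s : List Int) (hd : s.Pairwise (fun a b => b ≤ a)) (hne : s ≠ []) :
    1 + (s.zip s.tail).countP (fun p => decide (p.1 ≠ p.2)) = s.toFinset.card := by
  induction s with
  | nil => exact absurd rfl hne
  | cons x rest ih =>
    have hx : ∀ y ∈ rest, y ≤ x := (List.pairwise_cons.1 hd).1
    have hrest := (List.pairwise_cons.1 hd).2
    cases rest with
    | nil => simp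
    | cons y rest' =>
      have ihr := ih hrest (by simp)
      by_cases hxy : x = y
      · have hxmem : x ∈ y :: rest' := by rw [hxy]; exact List.mem_cons_self
        rw [List.toFinset_cons, Finset.insert_eq_self.2 (List.mem_toFinset.2 hxmem)]
        rw [← ihr]
        simp [hxy]
      · have hxnot : x ∉ y :: rest' := by
          intro hmem
          have h1 := hx x hmem
          have h2 : y ≤ x := hx y List.mem_cons_self
          have : ∀ z ∈ rest', z ≤ y := (List.pairwise_cons.1 hrest).1
          rcases List.mem_cons.1 hmem with he | hm
          · exact hxy he
          · have := this x hm
            have hyx : x ≤ y := this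
            exact hxy (le_antisymm hyx h2)
        rw [List.toFinset_cons, Finset.card_insert_of_notMem (by simpa using hxnot)]
        rw [← ihr]
        simp [hxy]
        omega


-- A's max test expressed as a count: max(hand) >= 14 iff some card >= 14.
lemma max_ge_iff_count (hand : List Int) (m : Int)
    (hm : PySem.List.max? hand (fun x => x) = some m) :
    (14 ≤ m) ↔ 1 ≤ hand.countP (fun x => decide (14 ≤ x)) := by
  constructor
  · intro h
    have := List.countP_pos_iff (p := fun x => decide (14 ≤ x)) (l := hand)
    exact this.2 ⟨m, PySem.List.max?_mem hm, by simpa using h⟩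
  · intro h
    obtain ⟨a, ha, hge⟩ := List.countP_pos_iff.1 (by omega : 0 < hand.countP (fun x => decide (14 ≤ x)))
    have := PySem.List.max?_isMax hm a ha
    simp only [decide_eq_true_eq] at hge
    omega

-- set cardinality of the hand as a Finset card
lemma setlen_eq_card (hand : List Int) :
    PySem.Set.len (PySem.Set.ofList hand) = (hand.toFinset.card : Int) := by
  rw [← PySem.List.dedup_eq_ofList]
  have hm : (PySem.List.dedup hand).toFinset = hand.toFinset := by
    ext a; simp
  simp only [PySem.Set.len]
  rw [← hm, List.toFinset_card_of_nodup (PySem.List.nodup_dedup hand)]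

-- ===== VERDICT (by name: the statement is the Claim_ definition above) =====
theorem check_guaranteed_win_spec : Claim_equal_check_guaranteed_win := by
  intro hand _ hpre
  unfold Spec_check_guaranteed_win check_guaranteed_win check_guaranteed_win_alt cgwBody
  have hperm : (PySem.List.sorted hand (fun x => x) true).Perm hand :=
    PySem.List.sorted_perm hand (fun x => x) true
  have hdesc : (PySem.List.sorted hand (fun x => x) true).Pairwise (fun a b : Int => b ≤ a) := by
    simpa using PySem.List.sorted_pairwise_rev hand (fun x => x)
  set s := PySem.List.sorted hand (fun x => x) true with hs
  have hsne : s ≠ [] := by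
    rw [hs, Ne, PySem.List.sorted_eq_nil_iff]; exact hpre
  have hlen : 0 < s.length := List.length_pos_iff.2 hsne
  have hcount : ∀ p : Int → Bool, hand.countP p = s.countP p := fun p => (hperm.countP_eq p).symm
  cases hmax : PySem.List.max? hand (fun x => x) with
  | none => exact absurd ((PySem.List.max?_eq_none_iff _ _).1 hmax) hpre
  | some m =>
    rw [PySem.List.pyGet?_zero, List.getElem?_eq_getElem hlen]
    dsimp only
    -- branch 1: max >= 14  iff  s[0] >= 14
    have i1 : (14 ≤ m) ↔ (14 ≤ s[0]) := by
      rw [max_ge_iff_count hand m hmax, hcount]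
      rw [show (1 : Nat) = 0 + 1 by rfl, countP_desc_iff s 14 0 hdesc]
      exact ⟨fun ⟨_, h⟩ => h, fun h => ⟨hlen, h⟩⟩
    norm_cast at i1
    -- branch 2: at least 4 cards >= 11  iff  s[3] >= 11
    have i2 : (4 ≤ (hand.filter (fun card => decide (11 ≤ card))).length) ↔
        (3 < s.length ∧ 11 ≤ PySem.List.pyGetD s 3 0) := by
      rw [← List.countP_eq_length_filter, hcount]
      rw [show (4 : Nat) = 3 + 1 by rfl, countP_desc_iff s 11 3 hdesc]
      constructor
      · intro ⟨h3, hv⟩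
        exact ⟨h3, by rw [PySem.List.pyGetD_ofNat' s 3 0, List.getD_eq_getElem _ _ h3]; exact hv⟩
      · intro ⟨h3, hv⟩
        exact ⟨h3, by rw [PySem.List.pyGetD_ofNat' s 3 0, List.getD_eq_getElem _ _ h3] at hv; exact hv⟩
    -- branch 3: at least 5 cards >= 10  iff  s[4] >= 10
    have i3 : (5 ≤ (hand.filter (fun card => decide (10 ≤ card))).length) ↔
        (4 < s.length ∧ 10 ≤ PySem.List.pyGetD s 4 0) := by
      rw [← List.countP_eq_length_filter, hcount]
      rw [show (5 : Nat) = 4 + 1 by rfl, countP_desc_iff s 10 4 hdesc]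
      constructor
      · intro ⟨h4, hv⟩
        exact ⟨h4, by rw [PySem.List.pyGetD_ofNat' s 4 0, List.getD_eq_getElem _ _ h4]; exact hv⟩
      · intro ⟨h4, hv⟩
        exact ⟨h4, by rw [PySem.List.pyGetD_ofNat' s 4 0, List.getD_eq_getElem _ _ h4] at hv; exact hv⟩
    -- branch 4: distinct values
    have i4 : (8 ≤ PySem.Set.len (PySem.Set.ofList hand)) ↔
        (8 ≤ 1 + (s.zip s.tail).countP (fun p => decide (p.1 ≠ p.2))) := by
      rw [setlen_eq_card, ← List.toFinset_eq_of_perm _ _ hperm, ← distinct_desc s hdesc hsne]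
      omega
    by_cases h1 : 14 ≤ m
    · rw [if_pos h1, if_pos (i1.1 h1)]
    · rw [if_neg h1, if_neg (fun h => h1 (i1.2 h))]
      by_cases h2 : 4 ≤ (hand.filter (fun card => decide (11 ≤ card))).length
      · obtain ⟨ha, hb⟩ := i2.1 h2
        rw [if_pos h2, if_pos (show (decide (4 ≤ s.length) && decide (11 ≤ PySem.List.pyGetD s 3 0)) = true by
          simp only [Bool.and_eq_true, decide_eq_true_eq]; exact ⟨by omega, hb⟩)]
      · rw [if_neg h2, if_neg (show ¬ ((decide (4 ≤ s.length) && decide (11 ≤ PySem.List.pyGetD s 3 0)) = true) by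
          simp only [Bool.and_eq_true, decide_eq_true_eq]
          rintro ⟨ha, hb⟩; exact h2 (i2.2 ⟨by omega, hb⟩))]
        by_cases h3 : 5 ≤ (hand.filter (fun card => decide (10 ≤ card))).length
        · obtain ⟨ha, hb⟩ := i3.1 h3
          rw [if_pos h3, if_pos (show (decide (5 ≤ s.length) && decide (10 ≤ PySem.List.pyGetD s 4 0)) = true by
            simp only [Bool.and_eq_true, decide_eq_true_eq]; exact ⟨by omega, hb⟩)]
        · rw [if_neg h3, if_neg (show ¬ ((decide (5 ≤ s.length) && decide (10 ≤ PySem.List.pyGetD s 4 0)) = true) by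
            simp only [Bool.and_eq_true, decide_eq_true_eq]
            rintro ⟨ha, hb⟩; exact h3 (i3.2 ⟨by omega, hb⟩))]
          by_cases h4 : 8 ≤ PySem.Set.len (PySem.Set.ofList hand)
          · rw [if_pos h4]
            exact (decide_eq_true (i4.1 h4)).symm
          · rw [if_neg h4]
            exact (decide_eq_false (fun h => h4 (i4.2 h))).symm
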